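-- pv_equiv track=rewrite | github.com/zjashanda/mars-belt | scripts/py/listenai_weekly_validation_runner.py | ordered_counter_parts
-- ===== SOURCE A (Python) =====
-- from typing import Any, Dict, List, Optional, Sequence
--
-- def ordered_counter_parts(counters: Dict[str, Any]) -> List[str]:
--     preferred = ["OK", "Skip", "Reboot", "ConfigFail", "WakeupFail", "ProtoFail", "AsrFail", "Fail", "UNKNOWN"]
--     parts: List[str] = []
--     seen = set()
--     for key in preferred:
--         if key in counters:
--             parts.append(f"{key}={counters[key]}")
--             seen.add(key)
--     for key in sorted(counters):
--         if key in seen: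
--             continue
--         parts.append(f"{key}={counters[key]}")
--     return parts
-- ===== SOURCE B (Python) =====
-- from typing import Any, Dict, List
--
-- def ordered_counter_parts(counters: Dict[str, Any]) -> List[str]:
--     preferred = ["OK", "Skip", "Reboot", "ConfigFail", "WakeupFail", "ProtoFail", "AsrFail", "Fail", "UNKNOWN"]
--     rank = {key: i for i, key in enumerate(preferred)}
--     keys = sorted(counters, key=lambda k: (rank.get(k, len(preferred)), k))
--     return [f"{k}={counters[k]}" for k in keys]
-- ===== Notes on version B (the rewrite author's own statement) =====
-- stated objective: simpler
-- what changed: A's two separate filtered passes (a preferred-order scan recording hits in a `seen` set, then a scan over sorted keys skipping seen ones) are replaced by a single keyed sort of all keys by the tuple (rank in preferred, key) followed by one formatting map.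
import Mathlib
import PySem

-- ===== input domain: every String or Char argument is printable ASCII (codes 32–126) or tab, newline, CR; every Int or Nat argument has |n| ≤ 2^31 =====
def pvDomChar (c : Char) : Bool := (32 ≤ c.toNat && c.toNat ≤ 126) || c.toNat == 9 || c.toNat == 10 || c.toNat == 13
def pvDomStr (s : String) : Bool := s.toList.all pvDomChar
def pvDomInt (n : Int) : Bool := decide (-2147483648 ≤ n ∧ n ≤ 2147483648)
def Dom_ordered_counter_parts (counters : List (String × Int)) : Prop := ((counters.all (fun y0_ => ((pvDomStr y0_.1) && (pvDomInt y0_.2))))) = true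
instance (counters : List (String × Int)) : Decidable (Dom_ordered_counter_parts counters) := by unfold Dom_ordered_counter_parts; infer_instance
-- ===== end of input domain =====

-- B replaces A's two filtered passes (preferred scan with a `seen` set, then a sorted-keys scan)
-- by one keyed sort over all keys with tuple key (rank, key); objective: simpler, same cost.


-- ===== PORT A =====
-- A: first loop over `preferred` appending present keys and recording them in `seen`,
-- then a loop over sorted(counters) appending the keys not in `seen`.
def ordered_counter_parts (counters : List (String × Int)) : List String :=
  let d := PySem.Dict.ofList counters
  let preferred : List String := ["OK", "Skip", "Reboot", "ConfigFail", "WakeupFail", "ProtoFail", "AsrFail", "Fail", "UNKNOWN"]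
  let st := preferred.foldl
    (fun (s : List String × PySem.Set String) key =>
      if d.contains key then
        (s.1 ++ [key ++ "=" ++ PySem.Int.toStr (d.getD key 0)], PySem.Set.add s.2 key)
      else s)
    ([], PySem.Set.empty)
  (PySem.List.sorted d.keys (fun k => k) false).foldl
    (fun parts key =>
      if PySem.Set.contains st.2 key then parts
      else parts ++ [key ++ "=" ++ PySem.Int.toStr (d.getD key 0)])
    st.1

-- ===== PORT B =====
-- B: rank dict {key: i for i, key in enumerate(preferred)}, one sort of all keys by (rank, key), one map.
def ordered_counter_parts_alt (counters : List (String × Int)) : List String :=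
  let d := PySem.Dict.ofList counters
  let preferred : List String := ["OK", "Skip", "Reboot", "ConfigFail", "WakeupFail", "ProtoFail", "AsrFail", "Fail", "UNKNOWN"]
  let rank := (PySem.List.enumerate preferred).foldl
    (fun (r : PySem.Dict String Int) p => r.insert p.2 p.1) PySem.Dict.empty
  let keys := PySem.List.sorted2 d.keys
    (fun k => rank.getD k (preferred.length : Int)) (fun k => k) false
  keys.map (fun k => k ++ "=" ++ PySem.Int.toStr (d.getD k 0))

-- ===== PRECONDITION & SPEC =====
def Spec_ordered_counter_parts (counters : List (String × Int)) (out : List String) : Prop := out = ordered_counter_parts_alt counters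
instance (counters : List (String × Int)) (out : List String) : Decidable (Spec_ordered_counter_parts counters out) := by unfold Spec_ordered_counter_parts; infer_instance

-- ===== CLAIM (what is proved, stated in full; the proofs are below) =====
def Claim_equal_ordered_counter_parts : Prop := ∀ (counters : List (String × Int)), Dom_ordered_counter_parts counters → Spec_ordered_counter_parts counters (ordered_counter_parts counters)

-- ===== LEMMAS AND PROOFS =====

-- The literal preferred list and the rank dict it produces.
def pvPref : List String := ["OK", "Skip", "Reboot", "ConfigFail", "WakeupFail", "ProtoFail", "AsrFail", "Fail", "UNKNOWN"]

def pvRank : PySem.Dict String Int :=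
  PySem.Dict.mk [("OK", 0), ("Skip", 1), ("Reboot", 2), ("ConfigFail", 3), ("WakeupFail", 4),
    ("ProtoFail", 5), ("AsrFail", 6), ("Fail", 7), ("UNKNOWN", 8)]

-- the rank-building fold of port B evaluates to the literal dict
theorem pvRank_eq :
    (PySem.List.enumerate pvPref).foldl
      (fun (r : PySem.Dict String Int) p => r.insert p.2 p.1) PySem.Dict.empty = pvRank := by
  decide

theorem pvRank_notin (k : String) (h : k ∉ pvPref) : pvRank.getD k 9 = 9 := by
  simp only [pvPref, List.mem_cons, not_or] at h
  obtain ⟨h1, h2, h3, h4, h5, h6, h7, h8, h9, -⟩ := h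
  simp [pvRank, PySem.Dict.getD, beq_iff_eq,
    Ne.symm h1, Ne.symm h2, Ne.symm h3, Ne.symm h4, Ne.symm h5, Ne.symm h6, Ne.symm h7,
    Ne.symm h8, Ne.symm h9, PySem.Dict.get?]

theorem pvRank_lt_nine : ∀ k ∈ pvPref, pvRank.getD k 9 < 9 := by decide

theorem pvRank_pairwise : pvPref.Pairwise (fun a b => pvRank.getD a 9 < pvRank.getD b 9) := by decide

theorem pvPref_nodup : pvPref.Nodup := by decide

-- A generic naming lemma for sorted2: any rearrangement strictly increasing in the tuple key
-- (k1, then k2) is sorted2.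
theorem pv_sorted2_eq_of_perm_of_pairwise {α κ₁ κ₂ : Type} [LinearOrder κ₁] [LinearOrder κ₂]
    (xs ys : List α) (k1 : α → κ₁) (k2 : α → κ₂) (hperm : ys.Perm xs)
    (hpw : ys.Pairwise (fun a b => k1 a < k1 b ∨ (k1 a = k1 b ∧ k2 a < k2 b))) :
    PySem.List.sorted2 xs k1 k2 false = ys := by
  have hkey : PySem.List.sorted2 xs k1 k2 false
      = PySem.List.sorted xs (fun x => toLex (k1 x, k2 x)) false := by
    have hlt : ∀ a b : α,
        (decide (k1 a < k1 b) || (!decide (k1 b < k1 a) && decide (k2 a < k2 b)))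
          = decide (toLex (k1 a, k2 a) < toLex (k1 b, k2 b)) := by
      intro a b
      rw [show (decide (toLex (k1 a, k2 a) < toLex (k1 b, k2 b)))
          = decide (k1 a < k1 b ∨ (k1 a = k1 b ∧ k2 a < k2 b)) from
        decide_eq_decide.mpr (by simp [Prod.Lex.lt_iff])]
      rcases lt_trichotomy (k1 a) (k1 b) with h | h | h
      · simp [h]
      · simp [h]
      · simp [h, not_lt_of_gt h, (ne_of_gt h)]
    simp only [PySem.List.sorted2, PySem.List.sorted, if_neg (by decide : ¬ (false = true))]
    congr 1
    funext acc x
    congr 1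
    funext a b
    exact hlt a b
  rw [hkey]
  apply PySem.List.sorted_eq_of_perm_of_pairwise_lt _ _ _ hperm
  exact hpw.imp (fun h => by simpa [Prod.Lex.lt_iff] using h)

theorem ordered_counter_parts_spec_aux (counters : List (String × Int)) :
    ordered_counter_parts counters = ordered_counter_parts_alt counters := by
  set d := PySem.Dict.ofList counters with hd
  set fmt := fun k : String => k ++ "=" ++ PySem.Int.toStr (d.getD k 0) with hfmt
  set c := fun k : String => d.contains k with hc
  -- the A side
  have hA : ordered_counter_parts counters
      = (pvPref.filter c).map fmt
        ++ ((PySem.List.sorted d.keys (fun k => k) false).filter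
              (fun k => !decide (k ∈ pvPref))).map fmt := by
    simp only [ordered_counter_parts]
    rw [← hd]
    rw [show (["OK", "Skip", "Reboot", "ConfigFail", "WakeupFail", "ProtoFail", "AsrFail", "Fail", "UNKNOWN"] : List String) = pvPref from rfl]
    rw [show (fun (s : List String × PySem.Set String) key =>
          if d.contains key then (s.1 ++ [key ++ "=" ++ PySem.Int.toStr (d.getD key 0)], PySem.Set.add s.2 key) else s)
        = (fun s key => (if c key then s.1 ++ [fmt key] else s.1,
                         if c key then PySem.Set.add s.2 key else s.2)) from
      funext fun s => funext fun k => by simp only [hc, hfmt]; split <;> rfl]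
    rw [PySem.List.foldl_prod_mk (f := fun a key => if c key then a ++ [fmt key] else a)
      (g := fun s key => if c key then PySem.Set.add s key else s)]
    rw [PySem.List.foldl_append_if c fmt, PySem.List.foldl_if_eq_foldl_filter c PySem.Set.add]
    rw [show (PySem.Set.empty : PySem.Set String) = ([] : List String) from rfl,
        ← PySem.Set.ofList_eq_foldl]
    set seen := PySem.Set.ofList (pvPref.filter c) with hseen
    rw [show (fun (parts : List String) key =>
          if PySem.Set.contains seen key then parts
          else parts ++ [key ++ "=" ++ PySem.Int.toStr (d.getD key 0)])
        = (fun parts key => if (!PySem.Set.contains seen key) then parts ++ [fmt key] else parts) from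
      funext fun parts => funext fun k => by
        simp only [hfmt]; cases PySem.Set.contains seen k <;> rfl]
    rw [PySem.List.foldl_append_if (fun k => !PySem.Set.contains seen k) fmt]
    rw [List.filter_congr (l := PySem.List.sorted d.keys (fun k => k) false)
      (q := fun k => !decide (k ∈ pvPref))
      (fun k hk => by
        have hk' : k ∈ d.keys := (PySem.List.mem_sorted _ _ _ _).1 hk
        have hck : d.contains k = true := (PySem.Dict.contains_iff_mem_keys d k).2 hk'
        by_cases hkP : k ∈ pvPref <;>
          simp [hseen, PySem.Set.contains, PySem.Set.mem_ofList, List.mem_filter, hc, hck, hkP])]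
    simp only [List.nil_append]
  -- the B side
  have hB : ordered_counter_parts_alt counters
      = (PySem.List.sorted2 d.keys (fun k => pvRank.getD k 9) (fun k => k) false).map fmt := by
    simp only [ordered_counter_parts_alt]
    rw [show (["OK", "Skip", "Reboot", "ConfigFail", "WakeupFail", "ProtoFail", "AsrFail", "Fail", "UNKNOWN"] : List String) = pvPref from rfl]
    rw [pvRank_eq]
    norm_num [pvPref]
    rw [← hd]
  -- the key lists agree
  have hkeys : PySem.List.sorted2 d.keys (fun k => pvRank.getD k 9) (fun k => k) false
      = pvPref.filter c
        ++ (PySem.List.sorted d.keys (fun k => k) false).filter (fun k => !decide (k ∈ pvPref)) := by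
    have hnodup : d.keys.Nodup := PySem.Dict.nodup_keys_ofList counters
    have hsortperm : (PySem.List.sorted d.keys (fun k => k) false).Perm d.keys :=
      PySem.List.sorted_perm _ _ _
    have hsortnodup : (PySem.List.sorted d.keys (fun k => k) false).Nodup :=
      hsortperm.nodup_iff.mpr hnodup
    apply pv_sorted2_eq_of_perm_of_pairwise
    · -- permutation
      have hsplit : ((PySem.List.sorted d.keys (fun k => k) false).filter (fun k => decide (k ∈ pvPref))
            ++ (PySem.List.sorted d.keys (fun k => k) false).filter (fun k => !decide (k ∈ pvPref))).Perm
          (PySem.List.sorted d.keys (fun k => k) false) :=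
        List.filter_append_perm _ _
      have hfirst : (pvPref.filter c).Perm
          ((PySem.List.sorted d.keys (fun k => k) false).filter (fun k => decide (k ∈ pvPref))) := by
        apply List.perm_of_nodup_nodup_toFinset_eq (pvPref_nodup.filter c) (hsortnodup.filter _)
        ext x
        simp [PySem.List.mem_sorted, hc,
          PySem.Dict.contains_iff_mem_keys, and_comm]
      exact ((hfirst.append_right _).trans hsplit).trans hsortperm
    · -- pairwise strictly increasing in (rank, key)
      rw [List.pairwise_append]
      refine ⟨?_, ?_, ?_⟩
      · exact (List.Pairwise.sublist List.filter_sublist pvRank_pairwise).imp Or.inl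
      · have hlt : (PySem.List.sorted d.keys (fun k => k) false).Pairwise (· < ·) := by
          have hle := PySem.List.sorted_pairwise d.keys (fun k : String => k)
          exact (List.pairwise_and_iff.mpr ⟨hle, hsortnodup⟩).imp
            (fun h => lt_of_le_of_ne h.1 h.2)
        refine ((List.Pairwise.sublist List.filter_sublist hlt).imp_of_mem ?_)
        intro a b ha hb hab
        have hna : a ∉ pvPref := by simpa using (List.mem_filter.1 ha).2
        have hnb : b ∉ pvPref := by simpa using (List.mem_filter.1 hb).2
        exact Or.inr ⟨by rw [pvRank_notin a hna, pvRank_notin b hnb], hab⟩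
      · intro a ha b hb
        have haP : a ∈ pvPref := (List.mem_filter.1 ha).1
        have hnb : b ∉ pvPref := by simpa using (List.mem_filter.1 hb).2
        exact Or.inl (by rw [pvRank_notin b hnb]; exact pvRank_lt_nine a haP)
  rw [hA, hB, hkeys, List.map_append]

-- ===== VERDICT (by name: the statement is the Claim_ definition above) =====
theorem ordered_counter_parts_spec : Claim_equal_ordered_counter_parts := by
  intro counters _
  unfold Spec_ordered_counter_parts
  exact ordered_counter_parts_spec_aux counters
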